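-- pv_equiv track=rewrite | github.com/Aminul-Momin/Algorithms_and_Data_Structures | ads/exercises/string_manipulation/autocomplete.py | autocomplete_v2
-- ===== SOURCE A (Python) =====
-- from typing import List, Dict
--
-- def autocomplete_v2(word_bank: List[str], prefix: str) -> List[str]:
--     class Node:
--         def __init__(self, char):
--             self._char = char
--             self._children = {}
--             self._is_word = False
--
--     def insert_word(word: str) -> None:
--         current = tri_root
--
--         for char in word:
--             if not current._children.get(char):
--                 current._children[char] = Node(char)
--             current = current._children[char]
--         current._is_word = True
--
--     def words_with_prefix(prefix: str) -> List[str]: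
--         def find_prefixed_words(n: Node, word) -> None:
--             if n._is_word: prefixed_words.append(word)
--             for char in n._children.keys():
--                 find_prefixed_words(n._children.get(char), word + char)
--
--         prefixed_words = []
--         current = tri_root
--         for char in prefix:
--             if char not in current._children: return prefixed_words
--             current = current._children[char]
--
--         find_prefixed_words(current, prefix)
--         return prefixed_words
--
--     tri_root = Node('')
--     for word in word_bank:
--         insert_word(word)
--     return words_with_prefix(prefix)
-- ===== SOURCE B (Python) =====
-- from typing import List
--
-- def autocomplete_v2(word_bank: List[str], prefix: str) -> List[str]:
--     # Trie-free: group suffixes by next character (first-appearance order) and recurse.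
--     suffixes = [w[len(prefix):] for w in word_bank if w.startswith(prefix)]
--
--     def collect(sufs: List[str], acc: str) -> List[str]:
--         out = [acc] if '' in sufs else []
--         buckets = {}
--         for s in sufs:
--             if s:
--                 buckets.setdefault(s[0], []).append(s[1:])
--         for ch, b in buckets.items():
--             out += collect(b, acc + ch)
--         return out
--
--     return collect(suffixes, prefix)
-- ===== Notes on version B (the rewrite author's own statement) =====
-- stated objective: faster
-- what changed: B never builds a trie of Node objects: it filters the bank by the prefix once, then recursively groups the remaining suffixes into first-appearance buckets by their next character, reproducing the trie DFS order (including its de-duplication) without inserting every character of every word into a node structure.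
import Mathlib
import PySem

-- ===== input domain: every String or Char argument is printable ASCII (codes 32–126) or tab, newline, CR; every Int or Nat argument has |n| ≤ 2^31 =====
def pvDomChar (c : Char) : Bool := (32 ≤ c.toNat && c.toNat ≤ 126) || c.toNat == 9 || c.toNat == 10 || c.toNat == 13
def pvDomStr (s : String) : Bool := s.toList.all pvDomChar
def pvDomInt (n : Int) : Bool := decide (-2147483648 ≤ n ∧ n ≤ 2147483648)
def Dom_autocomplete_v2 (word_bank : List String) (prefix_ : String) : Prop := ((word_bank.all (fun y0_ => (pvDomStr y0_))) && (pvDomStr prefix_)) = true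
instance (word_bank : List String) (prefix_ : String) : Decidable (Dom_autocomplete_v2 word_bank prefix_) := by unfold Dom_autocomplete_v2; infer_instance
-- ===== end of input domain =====

-- B drops the trie of Node objects: it filters the bank by the prefix once, then recursively
-- buckets the remaining suffixes by their next character in first-appearance order (objective: faster,
-- measured; non-matching words are only touched by the initial startswith filter).


-- ===== PORT A =====
-- The trie: children as an insertion-ordered association list (mutual pair, no nested inductive).
mutual
inductive TNode : Type
  | mk : Bool → TChildren → TNode
inductive TChildren : Type
  | nil : TChildren
  | cons : Char → TNode → TChildren → TChildren
end

-- children.get(char)  (first match, like the Python dict)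
def TChildren.get? : TChildren → Char → Option TNode
  | .nil, _ => none
  | .cons c' n t, c => if c' = c then some n else t.get? c

-- children[char] = n  (overwrite in place, new key appended — Python dict semantics)
def TChildren.set : TChildren → Char → TNode → TChildren
  | .nil, c, n => .cons c n .nil
  | .cons c' m t, c, n => if c' = c then .cons c' n t else .cons c' m (t.set c n)

def TNode.emptyN : TNode := .mk false .nil

-- insert_word: walk the chars, creating a fresh Node where children.get(char) is missing,
-- mark the final node as a word (functional rendering of the in-place mutation).
def insertW : TNode → List Char → TNode
  | .mk _ cs, [] => .mk true cs
  | .mk b cs, c :: r =>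
      .mk b (cs.set c (insertW ((cs.get? c).getD TNode.emptyN) r))

-- the walk down `prefix` in words_with_prefix; none = the early `return prefixed_words` ([])
def navigate : TNode → List Char → Option TNode
  | n, [] => some n
  | .mk _ cs, c :: p =>
      match cs.get? c with
      | none => none
      | some m => navigate m p

-- find_prefixed_words: preorder DFS, children in insertion order
mutual
def dfs : TNode → List Char → List (List Char)
  | .mk b cs, w => (if b then [w] else []) ++ dfsC cs w
def dfsC : TChildren → List Char → List (List Char)
  | .nil, _ => []
  | .cons c n t, w => dfs n (w ++ [c]) ++ dfsC t w
end

def autocomplete_v2 (word_bank : List String) (prefix_ : String) : List String :=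
  let root := word_bank.foldl (fun t w => insertW t w.toList) (.mk false .nil)
  match navigate root prefix_.toList with
  | none => []
  | some n => (dfs n prefix_.toList).map (fun cs => String.ofList cs)

-- ===== PORT B =====
-- collect(sufs, acc) of Source B; the extra Nat fuel only makes the recursion structural
-- (it is chosen above any suffix length, so the 0 branch is never taken).
def collectB : Nat → List (List Char) → List Char → List (List Char)
  | 0, _, _ => []
  | fuel + 1, sufs, acc =>
      let out := if [] ∈ sufs then [acc] else []
      let buckets : PySem.Dict Char (List (List Char)) :=
        sufs.foldl
          (fun d s =>
            match s with
            | [] => d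
            | c :: r => d.modify c [] (· ++ [r]))   -- buckets.setdefault(s[0], []).append(s[1:])
          PySem.Dict.empty
      buckets.items.foldl (fun o p => o ++ collectB fuel p.2 (acc ++ [p.1])) out

def autocomplete_v2_alt (word_bank : List String) (prefix_ : String) : List String :=
  let p := prefix_.toList
  -- suffixes = [w[len(prefix):] for w in word_bank if w.startswith(prefix)]
  let sufs := (word_bank.filter (fun w => PySem.Chars.startswith w.toList p)).map
      (fun w => w.toList.drop p.length)
  let fuel := (sufs.map List.length).foldl max 0 + 1
  (collectB fuel sufs p).map (fun cs => String.ofList cs)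

-- ===== PRECONDITION & SPEC =====
def Spec_autocomplete_v2 (word_bank : List String) (prefix_ : String) (out : List String) : Prop := out = autocomplete_v2_alt word_bank prefix_
instance (word_bank : List String) (prefix_ : String) (out : List String) : Decidable (Spec_autocomplete_v2 word_bank prefix_ out) := by unfold Spec_autocomplete_v2; infer_instance

-- ===== CLAIM (what is proved, stated in full; the proofs are below) =====
def Claim_equal_autocomplete_v2 : Prop := ∀ (word_bank : List String) (prefix_ : String), Dom_autocomplete_v2 word_bank prefix_ → Spec_autocomplete_v2 word_bank prefix_ (autocomplete_v2 word_bank prefix_)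

-- ===== LEMMAS AND PROOFS =====

-- trie built from a list of words (suffix lists)
def build (sufs : List (List Char)) : TNode := sufs.foldl insertW TNode.emptyN

-- first-appearance list of leading characters
def keysStep (ks : List Char) (s : List Char) : List Char :=
  match s with
  | [] => ks
  | c :: _ => if c ∈ ks then ks else ks ++ [c]

def keysOf (sufs : List (List Char)) : List Char := sufs.foldl keysStep []

-- the tails of the suffixes starting with c
def bucket (c : Char) (sufs : List (List Char)) : List (List Char) :=
  (sufs.filter (fun s => s.head? = some c)).map List.tail

def childrenOf : List Char → List (List Char) → TChildren
  | [], _ => .nil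
  | c :: ks, sufs => .cons c (build (bucket c sufs)) (childrenOf ks sufs)

def dictOf (sufs : List (List Char)) : PySem.Dict Char (List (List Char)) :=
  sufs.foldl
    (fun d s => match s with | [] => d | c :: r => d.modify c [] (· ++ [r]))
    PySem.Dict.empty

theorem mem_keys_aux (sufs : List (List Char)) (ks0 : List Char) (c : Char) :
    c ∈ sufs.foldl keysStep ks0 ↔ c ∈ ks0 ∨ ∃ s ∈ sufs, s.head? = some c := by
  induction sufs generalizing ks0 with
  | nil => simp
  | cons s sufs ih =>
    simp only [List.foldl_cons, ih, List.mem_cons]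
    cases s with
    | nil => simp [keysStep]
    | cons c' r =>
      by_cases h : c' ∈ ks0
      · simp only [keysStep, if_pos h]
        constructor
        · rintro (h1 | ⟨s, hs, hh⟩)
          · exact Or.inl h1
          · exact Or.inr ⟨s, Or.inr hs, hh⟩
        · rintro (h1 | ⟨s, hs | hs, hh⟩)
          · exact Or.inl h1
          · subst hs; simp only [List.head?_cons, Option.some.injEq] at hh; exact Or.inl (hh ▸ h)
          · exact Or.inr ⟨s, hs, hh⟩
      · simp only [keysStep, if_neg h, List.mem_append, List.mem_singleton]
        constructor
        · rintro ((h1 | h1) | ⟨s, hs, hh⟩)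
          · exact Or.inl h1
          · exact Or.inr ⟨c' :: r, Or.inl rfl, by simp [h1]⟩
          · exact Or.inr ⟨s, Or.inr hs, hh⟩
        · rintro (h1 | ⟨s, hs | hs, hh⟩)
          · exact Or.inl (Or.inl h1)
          · subst hs; simp only [List.head?_cons, Option.some.injEq] at hh; exact Or.inl (Or.inr hh.symm)
          · exact Or.inr ⟨s, hs, hh⟩

theorem mem_keysOf (sufs : List (List Char)) (c : Char) :
    c ∈ keysOf sufs ↔ ∃ s ∈ sufs, s.head? = some c := by
  simpa using mem_keys_aux sufs [] c

theorem nodup_keysOf (sufs : List (List Char)) : (keysOf sufs).Nodup := by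
  suffices H : ∀ (l : List (List Char)) (ks0 : List Char), ks0.Nodup → (l.foldl keysStep ks0).Nodup from
    H sufs [] (by simp)
  intro l
  induction l with
  | nil => intro ks0 h; simpa using h
  | cons s t ih =>
    intro ks0 h
    simp only [List.foldl_cons]
    apply ih
    cases s with
    | nil => exact h
    | cons c' r =>
      by_cases hc : c' ∈ ks0
      · simpa [keysStep, hc] using h
      · simp only [keysStep, if_neg hc]
        rw [List.nodup_append]
        refine ⟨h, by simp, ?_⟩
        intro a ha b hb
        simp only [List.mem_singleton] at hb
        subst hb
        exact fun he => hc (he ▸ ha)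

theorem keysOf_append (sufs : List (List Char)) (s : List Char) :
    keysOf (sufs ++ [s]) = keysStep (keysOf sufs) s := by
  simp [keysOf, List.foldl_append]

theorem bucket_append (c : Char) (sufs : List (List Char)) (s : List Char) :
    bucket c (sufs ++ [s]) = bucket c sufs ++ (if s.head? = some c then [s.tail] else []) := by
  by_cases h : s.head? = some c <;> simp [bucket, List.filter_append, h]

theorem bucket_eq_nil (c : Char) (sufs : List (List Char)) (h : c ∉ keysOf sufs) :
    bucket c sufs = [] := by
  rw [mem_keysOf] at h
  simp only [bucket, List.map_eq_nil_iff, List.filter_eq_nil_iff]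
  intro s hs hh
  exact h ⟨s, hs, by simpa using hh⟩

theorem childrenOf_congr (ks : List Char) (sufs sufs' : List (List Char))
    (h : ∀ c ∈ ks, bucket c sufs = bucket c sufs') :
    childrenOf ks sufs = childrenOf ks sufs' := by
  induction ks with
  | nil => rfl
  | cons k ks ih =>
    simp only [childrenOf]
    rw [h k (by simp), ih (fun c hc => h c (by simp [hc]))]

theorem get?_childrenOf (ks : List Char) (sufs : List (List Char)) (c : Char) :
    (childrenOf ks sufs).get? c = if c ∈ ks then some (build (bucket c sufs)) else none := by
  induction ks with
  | nil => simp [childrenOf, TChildren.get?]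
  | cons k ks ih =>
    by_cases h : k = c
    · subst h; simp [childrenOf, TChildren.get?]
    · simp [childrenOf, TChildren.get?, h, ih, Ne.symm h]

theorem set_childrenOf_mem (ks : List Char) (sufs sufs' : List (List Char)) (c : Char)
    (hnd : ks.Nodup) (hc : c ∈ ks)
    (hb : ∀ k ∈ ks, k ≠ c → bucket k sufs' = bucket k sufs) :
    (childrenOf ks sufs).set c (build (bucket c sufs')) = childrenOf ks sufs' := by
  induction ks with
  | nil => cases hc
  | cons k ks ih =>
    by_cases h : k = c
    · subst h
      simp only [childrenOf, TChildren.set, if_pos]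
      rw [childrenOf_congr ks sufs sufs'
        (fun c' hc' => (hb c' (by simp [hc']) (fun he => (List.nodup_cons.1 hnd).1 (he ▸ hc'))).symm)]
    · have hck : c ∈ ks := by
        rcases List.mem_cons.1 hc with h1 | h1
        · exact absurd h1.symm h
        · exact h1
      simp only [childrenOf, TChildren.set, if_neg h]
      rw [hb k (by simp) h,
        ih (List.nodup_cons.1 hnd).2 hck (fun k' hk' => hb k' (by simp [hk']))]

theorem set_childrenOf_not_mem (ks : List Char) (sufs sufs' : List (List Char)) (c : Char)
    (hc : c ∉ ks) (hb : ∀ k ∈ ks, bucket k sufs' = bucket k sufs) :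
    (childrenOf ks sufs).set c (build (bucket c sufs')) = childrenOf (ks ++ [c]) sufs' := by
  induction ks with
  | nil => simp [childrenOf, TChildren.set]
  | cons k ks ih =>
    have h : k ≠ c := fun he => hc (by simp [he])
    simp only [childrenOf, TChildren.set, if_neg h, List.cons_append]
    rw [hb k (by simp),
      ih (fun he => hc (by simp [he])) (fun k' hk' => hb k' (by simp [hk']))]

theorem build_append (l : List (List Char)) (s : List Char) :
    build (l ++ [s]) = insertW (build l) s := by
  simp [build, List.foldl_append]

theorem build_eq (sufs : List (List Char)) :
    build sufs = .mk (decide ([] ∈ sufs)) (childrenOf (keysOf sufs) sufs) := by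
  induction sufs using List.reverseRecOn with
  | nil => rfl
  | append_singleton sufs s ih =>
    rw [build_append, ih]
    cases s with
    | nil =>
      simp only [insertW, keysOf_append, keysStep]
      rw [childrenOf_congr (keysOf sufs) sufs (sufs ++ [[]])
        (fun c _ => by simp [bucket_append])]
      simp
    | cons c r =>
      simp only [insertW, get?_childrenOf]
      by_cases h : c ∈ keysOf sufs
      · rw [if_pos h, Option.getD_some]
        have hb : bucket c (sufs ++ [c :: r]) = bucket c sufs ++ [r] := by
          rw [bucket_append]; simp
        have h1 : insertW (build (bucket c sufs)) r = build (bucket c (sufs ++ [c :: r])) := by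
          rw [hb, build_append]
        rw [h1, set_childrenOf_mem (keysOf sufs) sufs (sufs ++ [c :: r]) c (nodup_keysOf _) h
          (fun k _ hk => by rw [bucket_append]; simp [Ne.symm hk])]
        rw [keysOf_append]
        simp [keysStep, h]
      · rw [if_neg h, Option.getD_none]
        have hb : bucket c (sufs ++ [c :: r]) = [r] := by
          rw [bucket_append, bucket_eq_nil c sufs h]; simp
        have h1 : insertW TNode.emptyN r = build (bucket c (sufs ++ [c :: r])) := by
          rw [hb]; rfl
        rw [h1, set_childrenOf_not_mem (keysOf sufs) sufs (sufs ++ [c :: r]) c h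
          (fun k hk => by
            have hck : ¬ c = k := fun he => h (he ▸ hk)
            rw [bucket_append]; simp [hck])]
        rw [keysOf_append]
        simp [keysStep, h]

theorem find?_beq (ks : List Char) (c : Char) :
    List.find? (fun k => k == c) ks = if c ∈ ks then some c else none := by
  induction ks with
  | nil => simp
  | cons k ks ih =>
    by_cases h : k = c
    · subst h; simp
    · simp [h, ih, Ne.symm h]

theorem items_dictOf (sufs : List (List Char)) :
    (dictOf sufs).items = (keysOf sufs).map (fun c => (c, bucket c sufs)) := by
  induction sufs using List.reverseRecOn with
  | nil => rfl
  | append_singleton sufs s ih =>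
    cases s with
    | nil =>
      have hd : dictOf (sufs ++ [[]]) = dictOf sufs := by simp [dictOf, List.foldl_append]
      rw [hd, ih, keysOf_append]
      exact List.map_congr_left (fun c _ => by simp [bucket_append])
    | cons c r =>
      have hd : dictOf (sufs ++ [c :: r]) = (dictOf sufs).modify c [] (· ++ [r]) := by
        simp [dictOf, List.foldl_append]
      have hget : (dictOf sufs).getD c [] = bucket c sufs := by
        by_cases h : c ∈ keysOf sufs
        · simp [PySem.Dict.getD, PySem.Dict.get?, ih, List.find?_map, Function.comp_def,
            find?_beq, h]
        · simp [PySem.Dict.getD, PySem.Dict.get?, ih, List.find?_map, Function.comp_def,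
            find?_beq, h, bucket_eq_nil c sufs h]
      have hcont : (dictOf sufs).contains c = decide (c ∈ keysOf sufs) := by
        simp only [PySem.Dict.contains, ih, List.any_map, Function.comp_def]
        by_cases h : c ∈ keysOf sufs
        · simp [h, List.any_eq_true]
        · simp only [h, decide_false, List.any_eq_false]
          intro k hk
          simp only [beq_iff_eq]
          exact fun he => h (he ▸ hk)
      rw [hd, PySem.Dict.modify, hget, PySem.Dict.items_insert, hcont]
      by_cases h : c ∈ keysOf sufs
      · rw [if_pos (by simp [h]), ih, List.map_map, keysOf_append]
        simp only [keysStep, if_pos h]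
        refine List.map_congr_left (fun k hk => ?_)
        by_cases hkc : k = c
        · subst hkc; simp [bucket_append]
        · simp only [Function.comp_def, beq_iff_eq, if_neg hkc]
          have : ¬ c = k := fun he => hkc he.symm
          rw [bucket_append]; simp [this]
      · rw [if_neg (by simp [h]), ih, keysOf_append]
        simp only [keysStep, if_neg h, List.map_append, List.map_singleton]
        congr 1
        · refine List.map_congr_left (fun k hk => ?_)
          have : ¬ c = k := fun he => h (he ▸ hk)
          rw [bucket_append]; simp [this]
        · rw [bucket_append, bucket_eq_nil c sufs h]; simp

theorem get?_set : ∀ (cs : TChildren) (c' : Char) (n : TNode) (c : Char),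
    (cs.set c' n).get? c = if c = c' then some n else cs.get? c
  | .nil, c', n, c => by
    by_cases h : c = c' <;> simp [TChildren.set, TChildren.get?, h]
    exact fun he => h he.symm
  | .cons a m t, c', n, c => by
    have ih := get?_set t c' n c
    by_cases h1 : a = c'
    · subst h1
      by_cases h2 : a = c
      · subst h2; simp [TChildren.set, TChildren.get?]
      · simp [TChildren.set, TChildren.get?, h2, Ne.symm h2]
    · by_cases h2 : a = c
      · subst h2
        simp [TChildren.set, TChildren.get?, h1]
      · simp [TChildren.set, TChildren.get?, h1, h2, ih]

theorem navigate_empty (p : List Char) :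
    navigate TNode.emptyN p = if p = [] then some TNode.emptyN else none := by
  cases p <;> simp [navigate, TNode.emptyN, TChildren.get?]

theorem navigate_cons (b : Bool) (cs : TChildren) (c : Char) (p : List Char) :
    navigate (TNode.mk b cs) (c :: p) =
      match cs.get? c with
      | none => none
      | some m => navigate m p := rfl

theorem nav_insert (p : List Char) (t : TNode) (w : List Char) :
    navigate (insertW t w) p =
      if p <+: w then some (insertW ((navigate t p).getD TNode.emptyN) (w.drop p.length))
      else navigate t p := by
  induction p generalizing t w with
  | nil => simp [navigate, List.nil_prefix]
  | cons c p ih =>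
    cases t with
    | mk b cs =>
      cases w with
      | nil =>
        have hnp : ¬ (c :: p <+: ([] : List Char)) := by simp
        simp [insertW, navigate, hnp]
      | cons c' w' =>
        have hstep : navigate (insertW (TNode.mk b cs) (c' :: w')) (c :: p) =
            if c = c' then navigate (insertW ((cs.get? c').getD TNode.emptyN) w') p
            else navigate (TNode.mk b cs) (c :: p) := by
          simp only [insertW]
          rw [navigate_cons, get?_set]
          by_cases h : c = c'
          · simp [h]
          · simp [h, navigate_cons]
        rw [hstep]
        by_cases h : c = c'
        · subst h
          rw [if_pos rfl, ih]
          have hpre : (c :: p <+: c :: w') ↔ (p <+: w') := by simp [List.cons_prefix_cons]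
          by_cases hp : p <+: w'
          · rw [if_pos hp, if_pos (hpre.2 hp), navigate_cons]
            cases hg : cs.get? c with
            | none =>
              by_cases hp0 : p = []
              · subst hp0; simp [navigate_empty]
              · simp [navigate_empty, hp0]
            | some m => simp
          · rw [if_neg hp, if_neg (fun hh => hp (hpre.1 hh)), navigate_cons]
            cases hg : cs.get? c with
            | none =>
              have hp0 : p ≠ [] := fun he => hp (he ▸ List.nil_prefix)
              simp [navigate_empty, hp0]
            | some m => simp
        · rw [if_neg h]
          have hnp : ¬ (c :: p <+: c' :: w') := by simp [List.cons_prefix_cons, h]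
          rw [if_neg hnp]

theorem nav_foldl (sufs : List (List Char)) (t : TNode) (p : List Char) :
    navigate (sufs.foldl insertW t) p =
      if sufs.filter (fun w => decide (p <+: w)) = [] then navigate t p
      else some (((sufs.filter (fun w => decide (p <+: w))).map (fun w => w.drop p.length)).foldl
        insertW ((navigate t p).getD TNode.emptyN)) := by
  induction sufs generalizing t with
  | nil => simp
  | cons w sufs ih =>
    simp only [List.foldl_cons]
    rw [ih]
    by_cases hw : p <+: w
    · have hf : (w :: sufs).filter (fun w => decide (p <+: w)) =
          w :: sufs.filter (fun w => decide (p <+: w)) := by simp [hw]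
      rw [hf]
      by_cases hr : sufs.filter (fun w => decide (p <+: w)) = []
      · rw [if_pos hr, hr]
        simp [nav_insert, hw]
      · rw [if_neg hr]
        simp only [if_neg (by simp : ¬ (w :: sufs.filter (fun w => decide (p <+: w)) = []))]
        rw [nav_insert, if_pos hw]
        simp [List.foldl_cons]
    · have hf : (w :: sufs).filter (fun w => decide (p <+: w)) =
          sufs.filter (fun w => decide (p <+: w)) := by simp [hw]
      rw [hf, nav_insert, if_neg hw]

theorem nav_build (ws : List (List Char)) (p : List Char) :
    navigate (build ws) p =
      if ws.filter (fun w => decide (p <+: w)) = [] ∧ p ≠ [] then none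
      else some (build ((ws.filter (fun w => decide (p <+: w))).map (fun w => w.drop p.length))) := by
  rw [build, nav_foldl]
  by_cases hr : ws.filter (fun w => decide (p <+: w)) = []
  · rw [if_pos hr, hr, navigate_empty]
    by_cases hp : p = []
    · subst hp; simp [build]
    · simp [hp]
  · rw [if_neg hr, if_neg (fun hh => hr hh.1), navigate_empty]
    by_cases hp : p = []
    · subst hp; simp [build]
    · simp [hp, build]

theorem dfsC_childrenOf (ks : List Char) (sufs : List (List Char)) (acc : List Char) :
    dfsC (childrenOf ks sufs) acc =
      ks.flatMap (fun c => dfs (build (bucket c sufs)) (acc ++ [c])) := by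
  induction ks with
  | nil => simp [childrenOf, dfsC]
  | cons k ks ih => simp [childrenOf, dfsC, ih]

theorem collectB_succ (fuel : Nat) (sufs : List (List Char)) (acc : List Char) :
    collectB (fuel + 1) sufs acc =
      (if [] ∈ sufs then [acc] else []) ++
        (dictOf sufs).items.flatMap (fun p => collectB fuel p.2 (acc ++ [p.1])) := by
  rw [show collectB (fuel + 1) sufs acc =
      List.foldl (fun o p => o ++ collectB fuel p.2 (acc ++ [p.1]))
        (if [] ∈ sufs then [acc] else []) (dictOf sufs).items from rfl]
  exact PySem.List.foldl_append_eq_flatMap _ _ _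

theorem collect_eq (fuel : Nat) (sufs : List (List Char)) (acc : List Char)
    (h : ∀ s ∈ sufs, s.length < fuel) :
    dfs (build sufs) acc = collectB fuel sufs acc := by
  induction fuel generalizing sufs acc with
  | zero =>
    cases sufs with
    | nil => simp [build, TNode.emptyN, dfs, dfsC, collectB]
    | cons s t => exact absurd (h s (by simp)) (by omega)
  | succ fuel ih =>
    rw [build_eq, collectB_succ, items_dictOf]
    simp only [dfs]
    congr 1
    · by_cases hm : [] ∈ sufs <;> simp [hm]
    · rw [dfsC_childrenOf, List.flatMap_map]
      simp only [List.flatMap_def]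
      refine congrArg List.flatten (List.map_congr_left (fun c hc => ?_))
      refine ih (bucket c sufs) (acc ++ [c]) (fun s hs => ?_)
      simp only [bucket, List.mem_map, List.mem_filter] at hs
      obtain ⟨x, ⟨hx, hhd⟩, rfl⟩ := hs
      have hlen := h x hx
      cases x with
      | nil => simp at hhd
      | cons a y => simp at hlen ⊢; omega

-- ===== VERDICT (by name: the statement is the Claim_ definition above) =====
theorem autocomplete_v2_spec : Claim_equal_autocomplete_v2 := by
  intro wb prefix_ _
  show autocomplete_v2 wb prefix_ = autocomplete_v2_alt wb prefix_
  have hsw : ∀ (s q : List Char), PySem.Chars.startswith s q = decide (q <+: s) := by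
    intro s q
    by_cases h : q <+: s
    · rw [decide_eq_true h]; exact (PySem.Chars.startswith_iff s q).2 h
    · rw [decide_eq_false h]
      exact Bool.eq_false_iff.2 (fun hb => h ((PySem.Chars.startswith_iff s q).1 hb))
  simp only [autocomplete_v2, autocomplete_v2_alt]
  have hfold : wb.foldl (fun t w => insertW t w.toList) (TNode.mk false TChildren.nil) =
      build (wb.map String.toList) := by
    simp [build, List.foldl_map, TNode.emptyN]
  rw [hfold, nav_build]
  have hfilter : (wb.filter (fun w => PySem.Chars.startswith w.toList prefix_.toList)).map
        (fun w => w.toList.drop prefix_.toList.length) =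
      ((wb.map String.toList).filter (fun w => decide (prefix_.toList <+: w))).map
        (fun w => w.drop prefix_.toList.length) := by
    rw [List.filter_map, List.map_map]
    congr 1
    apply List.filter_congr
    intro w _
    simpa using hsw w.toList prefix_.toList
  rw [hfilter]
  by_cases hcond : (wb.map String.toList).filter (fun w => decide (prefix_.toList <+: w)) = [] ∧
      prefix_.toList ≠ []
  · rw [if_pos hcond]
    rw [hcond.1]
    simp [collectB]
  · rw [if_neg hcond]
    exact congrArg (List.map (fun cs => String.ofList cs))
      (collect_eq _ _ _ (fun s hs => Nat.lt_succ_of_le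
        ((PySem.List.le_foldl_max _ 0).2 _ (List.mem_map_of_mem hs))))
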